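-- pv_equiv track=rewrite | github.com/abhinay56/DSA-using-Python | diff.py | strc
-- ===== SOURCE A (Python) =====
-- def strc(l):
--   diffs = []
--   for i in range(0,len(l)-1):
--     if(l[i+1] >= l[i]):
--       diff = l[i+1] - l[i]
--     else:
--       diff = l[i] - l[i+1]
--     diffs.append(diff)
--   for i in range(len(diffs)-1):
--     if(diffs[i] >= diffs[i+1]):
--       return False
--   return True
-- ===== SOURCE B (Python) =====
-- def strc(l):
--   prev = None
--   for x, y in zip(l, l[1:]):
--     d = abs(y - x)
--     if prev is not None and prev >= d:
--       return False
--     prev = d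
--   return True
-- ===== Notes on version B (the rewrite author's own statement) =====
-- stated objective: simpler
-- what changed: Replaces the build-a-diffs-list-then-rescan two-pass index loop by a single pairwise pass carrying only the previous difference, returning False at the first non-increase.
import Mathlib
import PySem

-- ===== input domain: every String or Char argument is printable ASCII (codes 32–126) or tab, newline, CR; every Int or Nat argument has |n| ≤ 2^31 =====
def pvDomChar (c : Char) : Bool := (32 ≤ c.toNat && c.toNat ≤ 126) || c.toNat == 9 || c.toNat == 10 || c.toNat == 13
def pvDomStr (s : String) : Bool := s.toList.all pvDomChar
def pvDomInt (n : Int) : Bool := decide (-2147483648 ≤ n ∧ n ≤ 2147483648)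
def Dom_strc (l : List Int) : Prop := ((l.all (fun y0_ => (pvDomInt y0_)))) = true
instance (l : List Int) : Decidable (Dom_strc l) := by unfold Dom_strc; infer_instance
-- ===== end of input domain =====

-- B is a single pairwise pass keeping only the previous |difference| (O(1) space, early exit)
-- instead of A's two passes over an intermediate diffs list; return values agree on all inputs.

-- ===== PORT A =====
-- first loop: for i in range(0, len(l)-1): diff = …; diffs.append(diff)
-- indices i and i+1 are always in range, so pyGetD's default 0 is never used
def strc (l : List Int) : Bool :=
  let diffs :=
    (PySem.List.pyRange 0 ((l.length : Int) - 1) 1).foldl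
      (fun diffs i =>
        let diff :=
          if PySem.List.pyGetD l (i + 1) 0 ≥ PySem.List.pyGetD l i 0 then
            PySem.List.pyGetD l (i + 1) 0 - PySem.List.pyGetD l i 0
          else
            PySem.List.pyGetD l i 0 - PySem.List.pyGetD l (i + 1) 0
        diffs ++ [diff]) []
  -- second loop with early 'return False' carried as a Bool flag
  (PySem.List.pyRange 0 ((diffs.length : Int) - 1) 1).foldl
    (fun ok i =>
      if PySem.List.pyGetD diffs i 0 ≥ PySem.List.pyGetD diffs (i + 1) 0 then false else ok)
    true

-- ===== PORT B =====
-- 'for x, y in zip(l, l[1:])' = structural recursion over adjacent pairs; prev : Option Int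
def strcAltGo (prev : Option Int) : List Int → Bool
  | [] => true
  | [_] => true
  | x :: y :: rest =>
    let d := |y - x|
    match prev with
    | some p => if p ≥ d then false else strcAltGo (some d) (y :: rest)
    | none => strcAltGo (some d) (y :: rest)

def strc_alt (l : List Int) : Bool := strcAltGo none l

-- ===== PRECONDITION & SPEC =====
def Spec_strc (l : List Int) (out : Bool) : Prop := out = strc_alt l
instance (l : List Int) (out : Bool) : Decidable (Spec_strc l out) := by unfold Spec_strc; infer_instance

-- ===== CLAIM (what is proved, stated in full; the proofs are below) =====
def Claim_equal_strc : Prop := ∀ (l : List Int), Dom_strc l → Spec_strc l (strc l)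

-- ===== LEMMAS AND PROOFS =====

-- the list of adjacent differences A's first loop builds
def pairDiffs : List Int → List Int
  | x :: y :: rest => (if y ≥ x then y - x else x - y) :: pairDiffs (y :: rest)
  | _ => []

theorem pairDiffs_length (l : List Int) : (pairDiffs l).length = l.length - 1 := by
  induction l with
  | nil => simp [pairDiffs]
  | cons a t ih =>
    cases t with
    | nil => simp [pairDiffs]
    | cons b r => simp [pairDiffs] at ih ⊢; omega

theorem pairDiffs_getElem (l : List Int) (k : Nat) (h : k + 1 < l.length) :
    (pairDiffs l)[k]'(by rw [pairDiffs_length]; omega) =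
      if l[k + 1] ≥ l[k] then l[k + 1] - l[k] else l[k] - l[k + 1] := by
  induction l generalizing k with
  | nil => simp at h
  | cons a t ih =>
    cases t with
    | nil => simp at h
    | cons b r =>
      cases k with
      | zero => simp [pairDiffs]
      | succ k =>
        have := ih (k := k) (by simpa using h)
        simpa [pairDiffs] using this

theorem diffs_eq (l : List Int) :
    (PySem.List.pyRange 0 ((l.length : Int) - 1) 1).foldl
      (fun diffs i =>
        let diff :=
          if PySem.List.pyGetD l (i + 1) 0 ≥ PySem.List.pyGetD l i 0 then
            PySem.List.pyGetD l (i + 1) 0 - PySem.List.pyGetD l i 0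
          else
            PySem.List.pyGetD l i 0 - PySem.List.pyGetD l (i + 1) 0
        diffs ++ [diff]) [] = pairDiffs l := by
  rw [PySem.List.foldl_append_singleton_eq_map]
  rw [List.nil_append]
  refine List.ext_getElem ?_ ?_
  · simp only [List.length_map, PySem.List.length_pyRange_one, pairDiffs_length]; omega
  · intro k h1 h2
    have hk : k + 1 < l.length := by
      simp [PySem.List.length_pyRange_one] at h1; omega
    rw [pairDiffs_getElem l k hk]
    rw [List.getElem_map]
    have hr : (PySem.List.pyRange 0 ((l.length : Int) - 1) 1)[k]'(by simpa using h1) = 0 + (k : Int) :=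
      PySem.List.getElem_pyRange_one (a := 0) (b := (l.length : Int) - 1) (k := k) (h := by simpa using h1)
    rw [hr]
    simp only [zero_add]
    have e1 : PySem.List.pyGetD l ((k : Int) + 1) 0 = l[k + 1] := by
      rw [PySem.List.pyGetD_eq_getElem l (i := (k : Int) + 1) 0 (by omega) (by push_cast; omega)]
      congr 1 <;> omega
    have e2 : PySem.List.pyGetD l (k : Int) 0 = l[k] := by
      rw [PySem.List.pyGetD_eq_getElem l (i := (k : Int)) 0 (by omega) (by push_cast; omega)]
      congr 1 <;> omega
    rw [e1, e2]

-- the second loop of A on a list ds equals strict-increase checking (List.IsChain (· < ·))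
theorem scan_eq_chain (ds : List Int) :
    (PySem.List.pyRange 0 ((ds.length : Int) - 1) 1).foldl
      (fun ok i =>
        if PySem.List.pyGetD ds i 0 ≥ PySem.List.pyGetD ds (i + 1) 0 then false else ok)
      true = decide (List.IsChain (· < ·) ds) := by
  have hfun : (fun ok i => if PySem.List.pyGetD ds i 0 ≥ PySem.List.pyGetD ds (i + 1) 0 then false else ok)
      = (fun (ok : Bool) (i : Int) =>
          if (decide (PySem.List.pyGetD ds i 0 ≥ PySem.List.pyGetD ds (i + 1) 0)) = true then false else ok) := by
    funext ok i; simp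
  rw [hfun, PySem.List.foldl_if_false_eq]
  simp only [Bool.true_and]
  by_cases h : List.IsChain (· < ·) ds
  · simp only [decide_eq_true h]
    rw [Bool.not_eq_true', List.any_eq_false]
    intro i hi
    rw [PySem.List.mem_pyRange_one] at hi
    obtain ⟨h0, h1⟩ := hi
    have hk : i.toNat + 1 < ds.length := by omega
    have := (List.isChain_iff_getElem.mp h) i.toNat hk
    have e1 : PySem.List.pyGetD ds i 0 = ds[i.toNat] := by
      rw [PySem.List.pyGetD_eq_getElem ds (i := i) 0 h0 (by omega)]
    have e2 : PySem.List.pyGetD ds (i + 1) 0 = ds[i.toNat + 1] := by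
      rw [PySem.List.pyGetD_eq_getElem ds (i := i + 1) 0 (by omega) (by omega)]
      congr 1 <;> omega
    simp [e1, e2]; omega
  · simp only [decide_eq_false h]
    rw [Bool.not_eq_false', List.any_eq_true]
    rw [List.isChain_iff_getElem] at h
    push Not at h
    obtain ⟨k, hk, hge⟩ := h
    refine ⟨(k : Int), ?_, ?_⟩
    · rw [PySem.List.mem_pyRange_one]; omega
    · have e1 : PySem.List.pyGetD ds (k : Int) 0 = ds[k] := by
        rw [PySem.List.pyGetD_eq_getElem ds (i := (k : Int)) 0 (by omega) (by omega)]
        congr 1 <;> omega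
      have e2 : PySem.List.pyGetD ds ((k : Int) + 1) 0 = ds[k + 1] := by
        rw [PySem.List.pyGetD_eq_getElem ds (i := (k : Int) + 1) 0 (by omega) (by omega)]
        congr 1 <;> omega
      simp [e1, e2]; omega

-- B with prev = some p checks IsChain (<) on p consed to the remaining diffs
theorem strcAltGo_some (l : List Int) (p : Int) :
    strcAltGo (some p) l = decide (List.IsChain (· < ·) (p :: pairDiffs l)) := by
  induction l generalizing p with
  | nil => simp [strcAltGo, pairDiffs]
  | cons a t ih =>
    cases t with
    | nil => simp [strcAltGo, pairDiffs]
    | cons b r =>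
      simp only [strcAltGo, pairDiffs]
      rw [ih]
      have habs : |b - a| = if b ≥ a then b - a else a - b := by
        by_cases h : a ≤ b
        · rw [abs_of_nonneg (by omega)]; simp [show b ≥ a from h]
        · rw [abs_of_neg (by omega)]; simp [show ¬ b ≥ a from h]
      rw [habs]
      by_cases hp : p ≥ (if b ≥ a then b - a else a - b)
      · have hnlt : ¬ p < (if b ≥ a then b - a else a - b) := by omega
        simp [hp, List.isChain_cons_cons, hnlt]
      · have hlt : p < (if b ≥ a then b - a else a - b) := by omega
        simp [hp, List.isChain_cons_cons, hlt]

theorem strc_alt_eq_chain (l : List Int) :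
    strc_alt l = decide (List.IsChain (· < ·) (pairDiffs l)) := by
  cases l with
  | nil => simp [strc_alt, strcAltGo, pairDiffs]
  | cons a t =>
    cases t with
    | nil => simp [strc_alt, strcAltGo, pairDiffs]
    | cons b r =>
      simp only [strc_alt, strcAltGo, pairDiffs]
      rw [strcAltGo_some]
      have habs : |b - a| = if b ≥ a then b - a else a - b := by
        by_cases h : a ≤ b
        · rw [abs_of_nonneg (by omega)]; simp [show b ≥ a from h]
        · rw [abs_of_neg (by omega)]; simp [show ¬ b ≥ a from h]
      rw [habs]
      rfl

-- ===== VERDICT (by name: the statement is the Claim_ definition above) =====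
theorem strc_spec : Claim_equal_strc := by
  intro l _
  unfold Spec_strc
  show strc l = strc_alt l
  unfold strc
  rw [diffs_eq, scan_eq_chain, strc_alt_eq_chain]
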